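-- pv_equiv track=rewrite | github.com/LucianoOro/PosOne-integrador-local | app/infrastructure/whatsapp/fallback_processor.py | _extraer_termino
-- ===== SOURCE A (Python) =====
-- def _extraer_termino(msg: str, stopwords: list[str]) -> str:
--     """Extrae el término de búsqueda relevante del mensaje."""
--     # Primero limpiar signos de puntuación y acentos exóticos
--     import unicodedata
--     cleaned = msg.lower()
--     # Remover signos de puntuación comunes en español
--     for ch in "¿?¡!.,;:()[]{}\"'":
--         cleaned = cleaned.replace(ch, " ")
--     # Normalizar espacios
--     words = cleaned.split()
--     significant = [w for w in words if w not in stopwords and len(w) > 2]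
--     return " ".join(significant) if significant else msg.strip()
-- ===== SOURCE B (Python) =====
-- def _extraer_termino(msg: str, stopwords: list[str]) -> str:
--     """Single left-to-right scan tokenizer instead of 16 replace passes + split."""
--     punct = set("\u00bf?\u00a1!.,;:()[]{}\"'")
--     words = []
--     buf = []
--     for ch in msg.lower():
--         if ch.isspace() or ch in punct:
--             if buf:
--                 words.append("".join(buf))
--                 buf = []
--         else:
--             buf.append(ch)
--     if buf:
--         words.append("".join(buf))
--     significant = [w for w in words if w not in stopwords and len(w) > 2]
--     return " ".join(significant) if significant else msg.strip()
-- ===== Notes on version B (the rewrite author's own statement) =====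
-- stated objective: alternative
-- what changed: Replaces the 16 sequential str.replace passes followed by split() with a single left-to-right character scan that buffers the current token and flushes it at each delimiter (whitespace or the same punctuation set), then applies the identical stopword/length filter and join-or-strip fallback.
import Mathlib
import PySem

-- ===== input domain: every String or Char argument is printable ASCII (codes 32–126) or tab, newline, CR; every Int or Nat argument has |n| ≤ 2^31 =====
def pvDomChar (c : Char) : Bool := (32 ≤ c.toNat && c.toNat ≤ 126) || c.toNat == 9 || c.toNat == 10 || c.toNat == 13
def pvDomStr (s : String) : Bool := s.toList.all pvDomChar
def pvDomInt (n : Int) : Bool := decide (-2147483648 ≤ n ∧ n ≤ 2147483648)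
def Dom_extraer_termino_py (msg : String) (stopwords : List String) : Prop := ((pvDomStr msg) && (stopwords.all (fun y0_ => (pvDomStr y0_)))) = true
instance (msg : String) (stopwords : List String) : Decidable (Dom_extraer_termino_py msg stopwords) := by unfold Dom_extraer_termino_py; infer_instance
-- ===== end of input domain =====

-- B replaces A's 16 sequential replace passes + split with one character scan; same filter and fallback (objective: alternative).

-- shared literal: the punctuation characters A's for-loop iterates over
def pvPunct : List Char := "¿?¡!.,;:()[]{}\"'".toList

-- ===== PORT A =====
def extraer_termino_py (msg : String) (stopwords : List String) : String :=
  let cleaned := PySem.Str.lower msg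
  let cleaned := pvPunct.foldl (fun s ch => PySem.Str.replace s (String.ofList [ch]) " ") cleaned
  let words := PySem.Str.split₀ cleaned
  let significant := words.filter (fun w => !(stopwords.contains w) && decide (2 < PySem.Str.len w))
  if significant.isEmpty then PySem.Str.strip msg else PySem.Str.join " " significant

-- ===== PORT B =====
def pvIsDelim (c : Char) : Bool := PySem.Chars.isspace c || pvPunct.contains c

-- the scan of Source B: buffer current token (reversed), flush at each delimiter
def pvTokenize : List Char → List Char → List (List Char)
  | [], buf => if buf.isEmpty then [] else [buf.reverse]
  | c :: rest, buf =>
    if pvIsDelim c then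
      if buf.isEmpty then pvTokenize rest [] else buf.reverse :: pvTokenize rest []
    else pvTokenize rest (c :: buf)

def extraer_termino_py_alt (msg : String) (stopwords : List String) : String :=
  let words := (pvTokenize (PySem.Chars.lower msg.toList) []).map String.ofList
  let significant := words.filter (fun w => !(stopwords.contains w) && decide (2 < PySem.Str.len w))
  if significant.isEmpty then PySem.Str.strip msg else PySem.Str.join " " significant

-- ===== PRECONDITION & SPEC =====
def Spec_extraer_termino_py (msg : String) (stopwords : List String) (out : String) : Prop := out = extraer_termino_py_alt msg stopwords
instance (msg : String) (stopwords : List String) (out : String) : Decidable (Spec_extraer_termino_py msg stopwords out) := by unfold Spec_extraer_termino_py; infer_instance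

-- ===== CLAIM (what is proved, stated in full; the proofs are below) =====
def Claim_equal_extraer_termino_py : Prop := ∀ (msg : String) (stopwords : List String), Dom_extraer_termino_py msg stopwords → Spec_extraer_termino_py msg stopwords (extraer_termino_py msg stopwords)

-- ===== LEMMAS AND PROOFS =====

-- the combined substitution all 16 replace passes amount to
def pvRep (c : Char) : Char := if pvPunct.contains c then ' ' else c

-- replace.go with enough fuel, single-char pattern: a pointwise map
theorem pvReplaceGo_single (c : Char) : ∀ (l acc : List Char) (fuel : Nat), l.length ≤ fuel →
    PySem.Chars.replace.go [c] [' '] fuel l acc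
      = acc.reverse ++ l.map (fun x => if x = c then ' ' else x) := by
  intro l
  induction l with
  | nil =>
    intro acc fuel _
    cases fuel <;> simp [PySem.Chars.replace.go]
  | cons c' t ih =>
    intro acc fuel hf
    cases fuel with
    | zero => simp at hf
    | succ f =>
      have h2 : t.length ≤ f := by simp at hf; omega
      by_cases h : c = c'
      · subst h
        simp [PySem.Chars.replace.go, List.isPrefixOf, ih, h2]
      · have hb : (c == c') = false := by simp [h]
        simp [PySem.Chars.replace.go, List.isPrefixOf, hb, ih, h2, Ne.symm h]

theorem pvReplace_single (s : List Char) (c : Char) :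
    PySem.Chars.replace s [c] [' '] = s.map (fun x => if x = c then ' ' else x) := by
  simpa [PySem.Chars.replace] using pvReplaceGo_single c s [] s.length (le_refl _)

-- the foldl of single-char replaces is one map, provided ' ' is not itself replaced
theorem pvFoldlReplace (ps : List Char) (hsp : ' ' ∉ ps) : ∀ (s : String),
    (ps.foldl (fun t ch => PySem.Str.replace t (String.ofList [ch]) " ") s).toList
      = s.toList.map (fun c => if ps.contains c then ' ' else c) := by
  induction ps with
  | nil => intro s; simp
  | cons p ps ih =>
    intro s
    have hsp' : ' ' ∉ ps := fun h => hsp (List.mem_cons_of_mem _ h)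
    simp only [List.foldl_cons]
    rw [ih hsp']
    have hrep : (PySem.Str.replace s (String.ofList [p]) " ").toList
        = s.toList.map (fun x => if x = p then ' ' else x) := by
      simp only [PySem.Str.replace, String.toList_ofList]
      rw [show (" " : String).toList = [' '] by decide]
      exact pvReplace_single s.toList p
    rw [hrep, List.map_map]
    apply List.map_congr_left
    intro x _
    by_cases hx : x = p
    · subst hx
      simp [Function.comp]
    · simp [Function.comp, hx]

theorem pvIsspace_rep (c : Char) : PySem.Chars.isspace (pvRep c) = pvIsDelim c := by
  by_cases h : c ∈ pvPunct
  · have hsp : PySem.Chars.isspace ' ' = true := by decide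
    simp [pvRep, pvIsDelim, List.contains_eq_mem, h, hsp]
  · simp [pvRep, pvIsDelim, List.contains_eq_mem, h]

theorem pvRep_of_not_delim {c : Char} (h : pvIsDelim c = false) : pvRep c = c := by
  have hm : c ∉ pvPunct := by
    unfold pvIsDelim at h
    simp only [List.contains_eq_mem, Bool.or_eq_false_iff, decide_eq_false_iff_not] at h
    exact h.2
  simp [pvRep, List.contains_eq_mem, hm]

-- split₀ of the cleaned text is exactly B's scan
theorem pvSplitGo_tokenize : ∀ (s cur : List Char) (accT : List (List Char)),
    PySem.Chars.split₀.go (s.map pvRep) cur accT = accT.reverse ++ pvTokenize s cur := by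
  intro s
  induction s with
  | nil =>
    intro cur accT
    by_cases h : cur.isEmpty <;> simp [PySem.Chars.split₀.go, pvTokenize, h]
  | cons c rest ih =>
    intro cur accT
    simp only [List.map_cons, PySem.Chars.split₀.go, pvIsspace_rep, pvTokenize]
    by_cases hd : pvIsDelim c = true
    · by_cases hc : cur.isEmpty = true
      · simp only [hd, hc, if_true]
        exact ih [] accT
      · simp only [hd, hc, if_true, if_false, Bool.false_eq_true]
        rw [ih [] (cur.reverse :: accT)]
        simp
    · have hd' : pvIsDelim c = false := by simpa using hd
      simp only [hd', Bool.false_eq_true, if_false, pvRep_of_not_delim hd']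
      exact ih (c :: cur) accT

-- A's word list equals B's word list
theorem pvWords_eq (msg : String) :
    PySem.Str.split₀ (pvPunct.foldl (fun s ch => PySem.Str.replace s (String.ofList [ch]) " ") (PySem.Str.lower msg))
      = (pvTokenize (PySem.Chars.lower msg.toList) []).map String.ofList := by
  unfold PySem.Str.split₀
  rw [pvFoldlReplace pvPunct (by decide)]
  have hmap : (PySem.Str.lower msg).toList.map (fun c => if pvPunct.contains c then ' ' else c)
      = (PySem.Chars.lower msg.toList).map pvRep := by
    simp [PySem.Str.lower, pvRep]
  rw [hmap]
  simp only [PySem.Chars.split₀]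
  rw [pvSplitGo_tokenize (PySem.Chars.lower msg.toList) [] []]
  simp

-- ===== VERDICT (by name: the statement is the Claim_ definition above) =====
theorem extraer_termino_py_spec : Claim_equal_extraer_termino_py := by
  intro msg stopwords _
  unfold Spec_extraer_termino_py extraer_termino_py extraer_termino_py_alt
  simp only [pvWords_eq]
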